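-- pv_equiv track=rewrite | github.com/shivankitj/AUTOMATED-ROOT-CAUSE-ANALYSIS-PLATFORM | Assignment3/implementations/RCAEngine.py | rank_causes
-- ===== SOURCE A (Python) =====
-- from typing import List, Dict, Optional
--
-- def rank_causes(possible_causes: List[str]) -> List[str]:
--     """
--     Rank possible causes by probability
--
--     Args:
--         possible_causes: List of cause strings
--
--     Returns:
--         Sorted list of causes (highest probability first)
--     """
--     # In a real system, this would use historical data
--     # For now, use simple heuristics
--
--     priority_order = [
--         'DEPLOYMENT_CONFIGURATION_ERROR',
--         'RESOURCE_EXHAUSTION',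
--         'NETWORK_CONNECTIVITY',
--         'DATABASE_FAILURE',
--         'APPLICATION_BUG',
--         'EXTERNAL_DEPENDENCY_FAILURE'
--     ]
--
--     ranked = []
--     for cause in priority_order:
--         if cause in possible_causes:
--             ranked.append(cause)
--
--     # Add remaining causes
--     for cause in possible_causes:
--         if cause not in ranked:
--             ranked.append(cause)
--
--     return ranked
-- ===== SOURCE B (Python) =====
-- def rank_causes(possible_causes):
--     priority_order = [
--         'DEPLOYMENT_CONFIGURATION_ERROR',
--         'RESOURCE_EXHAUSTION',
--         'NETWORK_CONNECTIVITY',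
--         'DATABASE_FAILURE',
--         'APPLICATION_BUG',
--         'EXTERNAL_DEPENDENCY_FAILURE'
--     ]
--     rank = {c: i for i, c in enumerate(priority_order)}
--     unique = list(dict.fromkeys(possible_causes))
--     return sorted(unique, key=lambda c: rank.get(c, len(priority_order)))
-- ===== Notes on version B (the rewrite author's own statement) =====
-- stated objective: faster
-- what changed: Replaces A's two append loops with linear membership scans of the growing result (priority filter pass, then append-if-unseen pass) by deduplicating once via dict.fromkeys (hash-based) and stable-sorting the unique causes under a precomputed rank table with a sentinel key for non-priority causes.
import Mathlib
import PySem

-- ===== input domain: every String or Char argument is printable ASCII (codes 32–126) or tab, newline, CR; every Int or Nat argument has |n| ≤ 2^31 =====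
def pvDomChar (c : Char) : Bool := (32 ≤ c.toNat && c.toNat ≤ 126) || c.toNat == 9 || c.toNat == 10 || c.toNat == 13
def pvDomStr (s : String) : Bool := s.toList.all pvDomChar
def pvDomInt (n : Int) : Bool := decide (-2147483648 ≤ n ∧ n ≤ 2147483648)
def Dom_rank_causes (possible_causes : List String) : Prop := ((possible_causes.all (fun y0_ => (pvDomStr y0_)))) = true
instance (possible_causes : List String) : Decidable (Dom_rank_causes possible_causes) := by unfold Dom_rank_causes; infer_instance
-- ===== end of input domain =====

-- B replaces A's two membership-scanning append loops by hash dedup + stable sort under a rank table (objective: faster, measured).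

-- the priority list both Pythons contain as a literal
def pvPrio : List String :=
  ["DEPLOYMENT_CONFIGURATION_ERROR",
   "RESOURCE_EXHAUSTION",
   "NETWORK_CONNECTIVITY",
   "DATABASE_FAILURE",
   "APPLICATION_BUG",
   "EXTERNAL_DEPENDENCY_FAILURE"]

-- ===== PORT A =====
def rank_causes (possible_causes : List String) : List String :=
  -- for cause in possible_causes: if cause not in ranked: ranked.append(cause)
  possible_causes.foldl
    (fun ranked cause => if cause ∉ ranked then ranked ++ [cause] else ranked)
    -- ranked = []; for cause in priority_order: if cause in possible_causes: ranked.append(cause)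
    (pvPrio.foldl
      (fun ranked cause => if cause ∈ possible_causes then ranked ++ [cause] else ranked) [])

-- ===== PORT B =====
-- rank = {c: i for i, c in enumerate(priority_order)}
def pvRank : PySem.Dict String Int :=
  (PySem.List.enumerate pvPrio).foldl (fun d p => d.insert p.2 p.1) PySem.Dict.empty

-- lambda c: rank.get(c, len(priority_order))
def pvKey (c : String) : Int := pvRank.getD c (pvPrio.length : Int)

def rank_causes_alt (possible_causes : List String) : List String :=
  -- unique = list(dict.fromkeys(possible_causes)); return sorted(unique, key=…)
  PySem.List.sorted (PySem.List.dedup possible_causes) pvKey false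

-- ===== PRECONDITION & SPEC =====
def Spec_rank_causes (possible_causes : List String) (out : List String) : Prop := out = rank_causes_alt possible_causes
instance (possible_causes : List String) (out : List String) : Decidable (Spec_rank_causes possible_causes out) := by unfold Spec_rank_causes; infer_instance

-- ===== CLAIM (what is proved, stated in full; the proofs are below) =====
def Claim_equal_rank_causes : Prop := ∀ (possible_causes : List String), Dom_rank_causes possible_causes → Spec_rank_causes possible_causes (rank_causes possible_causes)

-- ===== LEMMAS AND PROOFS =====

-- the rank table assigns each priority cause a key below 6 …
lemma pvKey_mem_lt {x : String} (hx : x ∈ pvPrio) : pvKey x < 6 := by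
  fin_cases hx <;> decide

-- … every other string the default key 6 …
lemma pvKey_not_mem {x : String} (hx : x ∉ pvPrio) : pvKey x = 6 := by
  simp [pvPrio, List.mem_cons] at hx
  obtain ⟨h1, h2, h3, h4, h5, h6⟩ := hx
  have e1 : ("DEPLOYMENT_CONFIGURATION_ERROR" == x) = false := beq_eq_false_iff_ne.mpr (Ne.symm h1)
  have e2 : ("RESOURCE_EXHAUSTION" == x) = false := beq_eq_false_iff_ne.mpr (Ne.symm h2)
  have e3 : ("NETWORK_CONNECTIVITY" == x) = false := beq_eq_false_iff_ne.mpr (Ne.symm h3)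
  have e4 : ("DATABASE_FAILURE" == x) = false := beq_eq_false_iff_ne.mpr (Ne.symm h4)
  have e5 : ("APPLICATION_BUG" == x) = false := beq_eq_false_iff_ne.mpr (Ne.symm h5)
  have e6 : ("EXTERNAL_DEPENDENCY_FAILURE" == x) = false := beq_eq_false_iff_ne.mpr (Ne.symm h6)
  simp [pvKey, pvRank, pvPrio, PySem.Dict.getD, PySem.Dict.get?, PySem.List.enumerate,
        PySem.Dict.insert, PySem.Dict.empty, PySem.Dict.contains,
        List.find?, e1, e2, e3, e4, e5, e6]

-- … and the priority list is strictly increasing under it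
lemma pvPrio_pairwise : pvPrio.Pairwise (fun a b => pvKey a < pvKey b) := by decide

-- A's first loop is a filter of the priority list
lemma loopA1 (pc : List String) :
    pvPrio.foldl (fun ranked cause => if cause ∈ pc then ranked ++ [cause] else ranked) [] =
    pvPrio.filter (fun c => decide (c ∈ pc)) := by
  have h : (fun (r : List String) c => if c ∈ pc then r ++ [c] else r) =
      (fun (r : List String) c => if (fun c => decide (c ∈ pc)) c = true then r ++ [id c] else r) := by
    funext r c; simp
  rw [h, PySem.List.foldl_append_if]
  simp

-- the append-if-unseen fold from any accumulator, phrased with PySem.Set.add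
lemma foldl_add_from_acc (pc : List String) : ∀ (acc : List String),
    pc.foldl PySem.Set.add acc = acc ++ (pc.foldl PySem.Set.add []).filter (fun c => decide (c ∉ acc)) := by
  induction pc with
  | nil => intro acc; simp
  | cons c rest ih =>
    intro acc
    have hc0 : PySem.Set.add [] c = [c] := by simp [PySem.Set.add]
    simp only [List.foldl_cons, hc0]
    rw [ih ([c])]
    by_cases hc : c ∈ acc
    · have hadd : PySem.Set.add acc c = acc := by simp [PySem.Set.add, hc]
      rw [hadd, ih acc, List.filter_append, List.filter_filter]
      have h1 : List.filter (fun y => decide (y ∉ acc)) [c] = [] := by simp [hc]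
      rw [h1, List.nil_append]
      congr 1
      apply List.filter_congr
      intro y hy
      by_cases hyc : y = c <;> simp [hyc, hc]
    · have hadd : PySem.Set.add acc c = acc ++ [c] := by simp [PySem.Set.add, hc]
      rw [hadd, ih (acc ++ [c]), List.filter_append, List.filter_filter, List.append_assoc]
      have h1 : List.filter (fun y => decide (y ∉ acc)) [c] = [c] := by simp [hc]
      rw [h1]
      congr 2
      apply List.filter_congr
      intro y hy
      by_cases hyc : y = c <;> by_cases hya : y ∈ acc <;> simp [hyc, hya, hc]

-- A's second loop appends exactly the deduped list's elements not already present
lemma loopA2 (pc : List String) (acc : List String) :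
    pc.foldl (fun ranked cause => if cause ∉ ranked then ranked ++ [cause] else ranked) acc =
    acc ++ (PySem.List.dedup pc).filter (fun c => decide (c ∉ acc)) := by
  have hfn : (fun (r : List String) c => if c ∉ r then r ++ [c] else r) = PySem.Set.add := by
    funext r c; by_cases h : c ∈ r <;> simp [PySem.Set.add, h]
  have hdd : PySem.List.dedup pc = pc.foldl PySem.Set.add [] := rfl
  rw [hfn, hdd]
  exact foldl_add_from_acc pc acc

-- inserting before an all-greater tail
lemma insertBy_append (bef : String → String → Bool) (x : String) (P R : List String)
    (hR : ∀ y ∈ R, bef x y = true) :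
    PySem.List.insertBy bef x (P ++ R) = PySem.List.insertBy bef x P ++ R := by
  induction P with
  | nil =>
    cases R with
    | nil => simp [PySem.List.insertBy]
    | cons r rs => simp [PySem.List.insertBy, hR r (by simp)]
  | cons p ps ih =>
    by_cases h : bef x p = true
    · simp [PySem.List.insertBy, h]
    · simp only [List.cons_append, PySem.List.insertBy, Bool.not_eq_true] at *
      simp [h, ih]

-- inserting a priority element into a filtered priority list lands at its rank position
lemma insertBy_filter {x : String} (ps : List String)
    (hpair : ps.Pairwise (fun a b => pvKey a < pvKey b)) (hx : x ∈ ps)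
    (m : String → Bool) (hmx : m x = false) :
    PySem.List.insertBy (fun a b => decide (pvKey a < pvKey b)) x (ps.filter m) =
    ps.filter (fun y => m y || y == x) := by
  induction ps with
  | nil => simp at hx
  | cons p pr ih =>
    rw [List.pairwise_cons] at hpair
    obtain ⟨hlt, hpr⟩ := hpair
    rcases List.mem_cons.mp hx with hxp | hxm
    · subst hxp
      have h1 : List.filter m (x :: pr) = List.filter m pr := by simp [hmx]
      have h2 : List.filter (fun y => m y || y == x) (x :: pr) =
          x :: List.filter m pr := by
        simp only [List.filter_cons]
        simp only [BEq.rfl, Bool.or_true, if_pos]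
        congr 1
        apply List.filter_congr
        intro y hy
        have : y ≠ x := fun he => absurd (hlt y hy) (by simp [he])
        simp [this]
      rw [h1, h2]
      have := insertBy_append (fun a b => decide (pvKey a < pvKey b)) x [] (List.filter m pr)
        (by intro y hy; simp; exact hlt y (List.mem_of_mem_filter hy))
      simpa using this
    · have hpx : pvKey p < pvKey x := hlt x hxm
      have hne : (p == x) = false := by
        apply beq_eq_false_iff_ne.mpr
        intro he; rw [he] at hpx; exact lt_irrefl _ hpx
      have hb : (decide (pvKey x < pvKey p)) = false := by simp; omega
      by_cases hmp : m p = true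
      · have h1 : List.filter m (p :: pr) = p :: List.filter m pr := by simp [hmp]
        have h2 : List.filter (fun y => m y || y == x) (p :: pr) =
            p :: List.filter (fun y => m y || y == x) pr := by simp [hmp]
        rw [h1, h2, ← ih hpr hxm]
        simp [PySem.List.insertBy, hb]
      · have hmp' : m p = false := by simpa using hmp
        have h1 : List.filter m (p :: pr) = List.filter m pr := by simp [hmp']
        have h2 : List.filter (fun y => m y || y == x) (p :: pr) =
            List.filter (fun y => m y || y == x) pr := by simp [hmp', hne]
        rw [h1, h2, ih hpr hxm]

-- the invariant of B's insertion-sort fold: processed elements sit as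
-- "priority elements in priority order, then the rest in arrival order"
lemma sort_inv (U : List String) : ∀ (V : List String), (V ++ U).Nodup →
    U.foldl (fun acc x => PySem.List.insertBy (fun a b => decide (pvKey a < pvKey b)) x acc)
      (pvPrio.filter (fun y => decide (y ∈ V)) ++ V.filter (fun y => decide (y ∉ pvPrio))) =
    pvPrio.filter (fun y => decide (y ∈ V ++ U)) ++ (V ++ U).filter (fun y => decide (y ∉ pvPrio)) := by
  induction U with
  | nil => intro V h; simp
  | cons x rest ih =>
    intro V h
    have hVx : ((V ++ [x]) ++ rest).Nodup := by
      rw [List.append_assoc]; simpa using h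
    have hxV : x ∉ V := by
      rw [List.nodup_append] at h
      exact fun hmem => h.2.2 x hmem x (by simp) rfl
    have hstep : PySem.List.insertBy (fun a b => decide (pvKey a < pvKey b)) x
        (pvPrio.filter (fun y => decide (y ∈ V)) ++ V.filter (fun y => decide (y ∉ pvPrio))) =
        pvPrio.filter (fun y => decide (y ∈ V ++ [x])) ++ (V ++ [x]).filter (fun y => decide (y ∉ pvPrio)) := by
      by_cases hx : x ∈ pvPrio
      · have hkx : pvKey x < 6 := pvKey_mem_lt hx
        rw [insertBy_append _ x _ _ (by
          intro y hy
          have hy' : y ∉ pvPrio := by simpa using List.of_mem_filter hy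
          simp [pvKey_not_mem hy']; omega)]
        rw [insertBy_filter pvPrio pvPrio_pairwise hx _ (by simpa using hxV)]
        have hP : pvPrio.filter (fun y => decide (y ∈ V) || y == x) =
            pvPrio.filter (fun y => decide (y ∈ V ++ [x])) := by
          apply List.filter_congr
          intro y _
          by_cases hyx : y = x <;> simp [hyx]
        rw [hP, List.filter_append]
        simp [hx]
      · have hkx : pvKey x = 6 := pvKey_not_mem hx
        rw [PySem.List.insertBy_of_forall_not_before _ x _ (by
          intro y hy
          rcases List.mem_append.mp hy with hyP | hyR
          · have : y ∈ pvPrio := List.mem_of_mem_filter hyP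
            have := pvKey_mem_lt this
            simp [hkx]; omega
          · have hy' : y ∉ pvPrio := by simpa using List.of_mem_filter hyR
            simp [hkx, pvKey_not_mem hy'])]
        have hP : pvPrio.filter (fun y => decide (y ∈ V ++ [x])) =
            pvPrio.filter (fun y => decide (y ∈ V)) := by
          apply List.filter_congr
          intro y hy
          have : y ≠ x := fun he => hx (he ▸ hy)
          simp [this]
        rw [hP, List.filter_append, List.append_assoc]
        simp [hx]
    rw [List.foldl_cons, hstep]
    have := ih (V ++ [x]) hVx
    rw [this, List.append_assoc]
    simp

-- ===== VERDICT (by name: the statement is the Claim_ definition above) =====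
theorem rank_causes_spec : Claim_equal_rank_causes := by
  intro pc _
  show rank_causes pc = rank_causes_alt pc
  unfold rank_causes rank_causes_alt
  rw [loopA1, loopA2, PySem.List.sorted_eq_foldl_insertBy]
  have h0 : pvPrio.filter (fun y => decide (y ∈ ([] : List String))) ++
      ([] : List String).filter (fun y => decide (y ∉ pvPrio)) = [] := by simp
  have hinv := sort_inv (PySem.List.dedup pc) [] (by simp)
  rw [h0] at hinv
  rw [hinv]
  simp only [List.nil_append]
  congr 1
  · apply List.filter_congr
    intro y _
    simp
  · apply List.filter_congr
    intro y hy
    have hypc : y ∈ pc := (PySem.List.mem_dedup pc y).mp hy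
    by_cases hyp : y ∈ pvPrio <;> simp [hyp, hypc, List.mem_filter]
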